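-- pv_equiv track=rewrite | github.com/ronenomer96/HaeuplerProject | FinalVersion/Converter.py | RSDecodeConv
-- ===== SOURCE A (Python) =====
-- def RSDecodeConv(bytearr,desiredLength):
--     result=""
--
--     for elem in bytearr:
--         numAsString=bin(elem)[2:]
--         result+=numAsString.zfill(8)
--     if (len(result)>desiredLength and len(result)>8):
--         result=result[0:desiredLength]
--     return result
-- ===== SOURCE B (Python) =====
-- def RSDecodeConv(bytearr, desiredLength):
--     if bytearr:
--         num = int.from_bytes(bytes(bytearr), 'big')
--         result = format(num, '0' + str(8 * len(bytearr)) + 'b')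
--     else:
--         result = ""
--     if len(result) > desiredLength and len(result) > 8:
--         result = result[0:desiredLength]
--     return result
-- ===== Notes on version B (the rewrite author's own statement) =====
-- stated objective: idiomatic
-- what changed: Replaces the per-byte bin/zfill/concatenate loop by a single int.from_bytes conversion of the whole array followed by one zero-padded format call of width 8*len.
-- outside the precondition, e.g. on RSDecodeConv([-5], 20): A returns '0000b101', B raises ValueError; on RSDecodeConv([300], 20): A returns '100101100', B raises ValueError
import Mathlib
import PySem

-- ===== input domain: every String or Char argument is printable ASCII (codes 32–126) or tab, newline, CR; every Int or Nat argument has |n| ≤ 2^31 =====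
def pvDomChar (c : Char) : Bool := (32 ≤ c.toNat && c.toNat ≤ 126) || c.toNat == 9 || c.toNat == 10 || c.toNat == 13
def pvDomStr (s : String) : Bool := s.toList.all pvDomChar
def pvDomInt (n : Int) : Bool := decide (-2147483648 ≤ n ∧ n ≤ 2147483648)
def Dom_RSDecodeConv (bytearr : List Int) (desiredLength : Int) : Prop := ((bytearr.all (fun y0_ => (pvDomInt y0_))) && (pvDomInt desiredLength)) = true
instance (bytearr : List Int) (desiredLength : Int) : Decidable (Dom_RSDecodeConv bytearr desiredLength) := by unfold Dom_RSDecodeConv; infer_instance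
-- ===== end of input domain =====

-- B converts the whole byte array to one big integer and formats it once as a
-- zero-padded binary string, instead of A's per-byte bin/zfill concatenation loop (idiomatic rewrite).


-- ===== PORT A =====
-- numAsString.zfill(8): left-pad with '0' to width 8
def pvZfill8 (l : List Char) : List Char := List.replicate (8 - l.length) '0' ++ l

def RSDecodeConv (bytearr : List Int) (desiredLength : Int) : String :=
  -- result += bin(elem)[2:].zfill(8); bin(elem)[2:] ported as Nat.toDigits 2 elem.toNat,
  -- exact for 0 ≤ elem (guaranteed by Pre_RSDecodeConv)
  let result : List Char :=
    bytearr.foldl (fun acc elem => acc ++ pvZfill8 (Nat.toDigits 2 elem.toNat)) []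
  if (result.length : Int) > desiredLength ∧ result.length > 8 then
    String.mk (PySem.List.slice result (some 0) (some desiredLength))
  else
    String.mk result

-- ===== PORT B =====
-- format(num, '0' + str w + 'b') ported as fixed-width binary of exactly w digits;
-- exact whenever num < 2^w, which Pre_RSDecodeConv guarantees (each byte is 0..255)
def pvPadBin : Nat → Nat → List Char
  | 0, _ => []
  | m + 1, n => pvPadBin m (n / 2) ++ [if n % 2 == 1 then '1' else '0']

def RSDecodeConv_alt (bytearr : List Int) (desiredLength : Int) : String :=
  let result : List Char :=
    match bytearr with
    | [] => []
    | _ :: _ =>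
      -- num = int.from_bytes(bytes(bytearr), 'big')
      pvPadBin (8 * bytearr.length) (bytearr.foldl (fun n e => n * 256 + e) (0 : Int)).toNat
  if (result.length : Int) > desiredLength ∧ result.length > 8 then
    String.mk (PySem.List.slice result (some 0) (some desiredLength))
  else
    String.mk result

-- ===== PRECONDITION & SPEC =====
-- Pre_ excludes inputs with an element outside 0..255: there A still returns, but its per-element
-- string is not an 8-bit binary chunk (bin(-5)[2:] even contains a literal 'b'), while B's
-- bytes()/int.from_bytes conversion raises ValueError on such non-byte elements.
def Pre_RSDecodeConv (bytearr : List Int) (desiredLength : Int) : Prop :=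
  ∀ e ∈ bytearr, 0 ≤ e ∧ e < 256
instance (bytearr : List Int) (desiredLength : Int) : Decidable (Pre_RSDecodeConv bytearr desiredLength) := by unfold Pre_RSDecodeConv; infer_instance

def pvWitness_RSDecodeConv : List Int × Int := ([72, 0, 255], 20)

def Spec_RSDecodeConv (bytearr : List Int) (desiredLength : Int) (out : String) : Prop := out = RSDecodeConv_alt bytearr desiredLength
instance (bytearr : List Int) (desiredLength : Int) (out : String) : Decidable (Spec_RSDecodeConv bytearr desiredLength out) := by unfold Spec_RSDecodeConv; infer_instance

-- ===== CLAIM (what is proved, stated in full; the proofs are below) =====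
def Claim_equal_RSDecodeConv : Prop := ∀ (bytearr : List Int) (desiredLength : Int), Dom_RSDecodeConv bytearr desiredLength → Pre_RSDecodeConv bytearr desiredLength → Spec_RSDecodeConv bytearr desiredLength (RSDecodeConv bytearr desiredLength)

-- ===== LEMMAS AND PROOFS =====

-- splitting a fixed-width binary rendering at a byte boundary
theorem pvPadBin_split (k : Nat) : ∀ (m a e : Nat), e < 2 ^ k →
    pvPadBin (m + k) (a * 2 ^ k + e) = pvPadBin m a ++ pvPadBin k e := by
  induction k with
  | zero =>
    intro m a e he
    interval_cases e
    simp [pvPadBin]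
  | succ k ih =>
    intro m a e he
    have hp : a * 2 ^ (k + 1) + e = e + 2 * (a * 2 ^ k) := by ring
    have h1 : (a * 2 ^ (k + 1) + e) / 2 = a * 2 ^ k + e / 2 := by
      rw [hp, Nat.add_mul_div_left _ _ (by norm_num : (0 : ℕ) < 2)]
      omega
    have h2 : (a * 2 ^ (k + 1) + e) % 2 = e % 2 := by
      rw [hp, Nat.mul_comm, Nat.add_mul_mod_self_right]
    have h3 : m + (k + 1) = (m + k) + 1 := by omega
    rw [h3, pvPadBin, h1, h2, ih m a (e / 2) (by rw [pow_succ] at he; omega), pvPadBin,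
      List.append_assoc]

-- the two per-byte renderings agree on every byte value
set_option maxRecDepth 8000 in
theorem pvZfill8_eq_padBin : ∀ e < 256, pvZfill8 (Nat.toDigits 2 e) = pvPadBin 8 e := by
  decide

-- loop invariant: A's accumulated chunks equal the fixed-width rendering of B's accumulated number
theorem pv_main (xs : List Int) : ∀ (m a : Nat), (∀ e ∈ xs, 0 ≤ e ∧ e < 256) →
    pvPadBin (m + 8 * xs.length) (xs.foldl (fun n e => n * 256 + e) ((a : Nat) : Int)).toNat
      = pvPadBin m a ++ xs.flatMap (fun e => pvZfill8 (Nat.toDigits 2 e.toNat)) := by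
  induction xs with
  | nil => intro m a _; simp
  | cons x xs ih =>
    intro m a hx
    obtain ⟨hx0, hx256⟩ := hx x (by simp)
    have hcast : ((a : Nat) : Int) * 256 + x = (((a * 256 + x.toNat : Nat)) : Int) := by
      push_cast
      omega
    have hlen : m + 8 * (x :: xs).length = (m + 8) + 8 * xs.length := by
      simp [List.length_cons]; ring
    rw [List.foldl_cons, hcast, hlen, ih (m + 8) (a * 256 + x.toNat)
      (fun e he => hx e (List.mem_cons_of_mem _ he))]
    have hsplit : pvPadBin (m + 8) (a * 256 + x.toNat)
        = pvPadBin m a ++ pvPadBin 8 x.toNat := by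
      have := pvPadBin_split 8 m a x.toNat (by omega)
      simpa using this
    rw [hsplit, List.append_assoc, List.flatMap_cons,
      pvZfill8_eq_padBin x.toNat (by omega)]

-- the two loop results coincide under Pre_
theorem pv_lists_eq (bytearr : List Int) (hpre : ∀ e ∈ bytearr, 0 ≤ e ∧ e < 256) :
    bytearr.foldl (fun acc elem => acc ++ pvZfill8 (Nat.toDigits 2 elem.toNat)) []
      = (match bytearr with
         | [] => []
         | _ :: _ => pvPadBin (8 * bytearr.length)
             (bytearr.foldl (fun n e => n * 256 + e) (0 : Int)).toNat) := by
  match bytearr with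
  | [] => simp
  | x :: xs =>
    rw [PySem.List.foldl_append_eq_flatMap, List.nil_append]
    have := pv_main (x :: xs) 0 0 hpre
    simp only [Nat.cast_zero, Nat.zero_add, pvPadBin, List.nil_append] at this
    rw [← this]

-- ===== VERDICT (by name: the statement is the Claim_ definition above) =====
theorem RSDecodeConv_spec : Claim_equal_RSDecodeConv := by
  intro bytearr desiredLength _ hpre
  have h := pv_lists_eq bytearr hpre
  unfold Spec_RSDecodeConv RSDecodeConv RSDecodeConv_alt
  cases bytearr with
  | nil => rfl
  | cons x xs => rw [h]
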